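-- pv_equiv track=rewrite | github.com/wizdom-js/algorithm | 프로그래머스/최고의 집합.py | solution
-- ===== SOURCE A (Python) =====
-- def solution(n, s):
--     answer = []
--
--     if s // n < 1:
--         answer = [-1]
--     else:
--         s_n = s // n
--
--         for i in range(n):
--             answer.append(s_n)
--         s_p_n = s % n
--
--         idx = len(answer) - 1
--
--         for i in range(s_p_n):
--             answer[idx - i] = answer[idx - i] + 1
--
--     return answer
-- ===== SOURCE B (Python) =====
-- def solution(n, s):
--     if s // n < 1:
--         return [-1]
--     return [(s + i) // n for i in range(n)]
-- ===== Notes on version B (the rewrite author's own statement) =====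
-- stated objective: simpler
-- what changed: Replaces A's two-phase in-place mutation (fill n copies of s//n, then a second loop incrementing the last s%n slots) with a per-index closed form: element i is (s+i)//n, computed independently in one comprehension with no remainder bookkeeping and no mutation.
import Mathlib
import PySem

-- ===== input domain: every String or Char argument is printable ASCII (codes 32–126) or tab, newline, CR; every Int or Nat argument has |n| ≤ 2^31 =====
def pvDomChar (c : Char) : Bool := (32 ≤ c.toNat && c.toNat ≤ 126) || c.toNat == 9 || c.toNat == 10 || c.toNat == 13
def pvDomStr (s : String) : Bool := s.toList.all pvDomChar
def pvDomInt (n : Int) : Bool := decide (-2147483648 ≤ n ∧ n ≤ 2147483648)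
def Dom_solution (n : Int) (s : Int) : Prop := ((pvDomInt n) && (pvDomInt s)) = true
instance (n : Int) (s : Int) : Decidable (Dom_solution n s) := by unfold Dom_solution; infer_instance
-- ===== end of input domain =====

-- B replaces A's fill-then-patch mutation with a per-index closed form:
-- element i is (s+i)//n, computed independently (objective: simpler).

-- ===== PORT A =====
-- Python item assignment xs[i] = f(xs[i]) (negative index wraps; out-of-range,
-- unreachable under Pre_, is a no-op here where Python would raise IndexError)
def pySetItem (xs : List Int) (i : Int) (f : Int → Int) : List Int :=
  let j : Int := if i < 0 then i + xs.length else i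
  xs.modify j.toNat f

def solution (n : Int) (s : Int) : List Int :=
  if PySem.Int.floordiv s n < 1 then [-1]
  else
    let s_n := PySem.Int.floordiv s n
    let answer := (PySem.List.pyRange 0 n 1).foldl (fun acc _ => acc ++ [s_n]) []
    let s_p_n := PySem.Int.mod s n
    let idx : Int := (answer.length : Int) - 1
    (PySem.List.pyRange 0 s_p_n 1).foldl (fun acc i => pySetItem acc (idx - i) (· + 1)) answer

-- ===== PORT B =====
def solution_alt (n : Int) (s : Int) : List Int :=
  if PySem.Int.floordiv s n < 1 then [-1]
  else (PySem.List.pyRange 0 n 1).map (fun i => PySem.Int.floordiv (s + i) n)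

-- ===== PRECONDITION & SPEC =====
-- Pre_ excludes exactly n = 0, where Python's s // n raises ZeroDivisionError (in A and in B).
def Pre_solution (n : Int) (s : Int) : Prop := n ≠ 0
instance (n : Int) (s : Int) : Decidable (Pre_solution n s) := by unfold Pre_solution; infer_instance
def pvWitness_solution : Int × Int := (3, 14)

def Spec_solution (n : Int) (s : Int) (out : List Int) : Prop := out = solution_alt n s
instance (n : Int) (s : Int) (out : List Int) : Decidable (Spec_solution n s out) := by unfold Spec_solution; infer_instance

-- ===== CLAIM (what is proved, stated in full; the proofs are below) =====
def Claim_equal_solution : Prop := ∀ (n : Int) (s : Int), Dom_solution n s → Pre_solution n s → Spec_solution n s (solution n s)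

-- ===== LEMMAS AND PROOFS =====

-- a map whose function is constant on the list is a replicate
theorem map_const_on (l : List Int) (f : Int → Int) (c : Int)
    (h : ∀ x ∈ l, f x = c) : l.map f = List.replicate l.length c := by
  induction l with
  | nil => simp
  | cons a t ih =>
      simp only [List.map, List.length_cons, List.replicate_succ]
      rw [h a (by simp), ih (fun x hx => h x (by simp [hx]))]

-- appending one element per range item is List.replicate
theorem foldl_append_replicate (l : List Int) (x : Int) (init : List Int) :
    l.foldl (fun acc _ => acc ++ [x]) init = init ++ List.replicate l.length x := by
  induction l generalizing init with
  | nil => simp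
  | cons a t ih => simp [List.foldl, ih, List.replicate_succ]

-- modifying the last element of the leading replicate block
theorem modify_last_replicate (a : Nat) (q : Int) (f : Int → Int) (rest : List Int) :
    (List.replicate (a + 1) q ++ rest).modify a f = List.replicate a q ++ f q :: rest := by
  induction a with
  | zero => simp [List.modify_cons]
  | succ b ih =>
      have h : List.replicate (b + 2) q ++ rest = q :: (List.replicate (b + 1) q ++ rest) := by
        simp [List.replicate_succ]
      have hb : (b + 1) - 1 = b := rfl
      rw [h, List.modify_cons, if_neg (by omega : ¬ (b + 1 = 0)), hb, ih]
      simp [List.replicate_succ]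

-- the tail-patching loop of A, over the last k positions of replicate m q
theorem loop2_eq (m : Nat) (q : Int) : ∀ (k : Nat), k ≤ m →
    (PySem.List.pyRange 0 (k : Int) 1).foldl
        (fun acc i => pySetItem acc (((m : Int) - 1) - i) (· + 1)) (List.replicate m q)
      = List.replicate (m - k) q ++ List.replicate k (q + 1) := by
  intro k
  induction k with
  | zero => intro _; simp
  | succ j ih =>
      intro hk
      have hsplit : PySem.List.pyRange 0 ((j : Nat) + 1 : Int) 1
          = PySem.List.pyRange 0 (j : Int) 1 ++ [(j : Int)] := by
        have := PySem.List.pyRange_one_succ_right (a := 0) (b := (j : Int)) (by omega)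
        simpa using this
      have hcast : ((j + 1 : Nat) : Int) = ((j : Nat) : Int) + 1 := by push_cast; ring
      rw [hcast]
      rw [hsplit, List.foldl_append, ih (by omega)]
      simp only [List.foldl]
      have hidx : ((m : Int) - 1) - (j : Int) = ((m - j - 1 : Nat) : Int) := by omega
      have hnonneg : ¬ (((m : Int) - 1) - (j : Int) < 0) := by omega
      unfold pySetItem
      simp only [hnonneg, if_false]
      rw [hidx, Int.toNat_natCast]
      obtain ⟨a, ha⟩ : ∃ a, m - j = a + 1 := ⟨m - j - 1, by omega⟩
      have hia : m - j - 1 = a := by omega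
      rw [hia, ha, modify_last_replicate]
      have h2 : m - (j + 1) = a := by omega
      rw [h2]
      simp [List.replicate_succ]

-- B's per-index formula equals the two-segment form (n > 0)
theorem map_formula_eq (n s : Int) (hpos : 0 < n) :
    (PySem.List.pyRange 0 n 1).map (fun i => PySem.Int.floordiv (s + i) n)
      = List.replicate (n - PySem.Int.mod s n).toNat (PySem.Int.floordiv s n)
        ++ List.replicate (PySem.Int.mod s n).toNat (PySem.Int.floordiv s n + 1) := by
  set q := PySem.Int.floordiv s n with hq
  set r := PySem.Int.mod s n with hr
  have hr0 : 0 ≤ r := PySem.Int.mod_nonneg (a := s) hpos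
  have hrn : r < n := PySem.Int.mod_lt (a := s) hpos
  have hs : q * n + r = s := PySem.Int.floordiv_mul_add_mod s n
  have hsplit : PySem.List.pyRange 0 n 1
      = PySem.List.pyRange 0 (n - r) 1 ++ PySem.List.pyRange (n - r) n 1 :=
    PySem.List.pyRange_one_append 0 (n - r) n (by omega) (by omega)
  rw [hsplit, List.map_append]
  have hlo : (PySem.List.pyRange 0 (n - r) 1).map (fun i => PySem.Int.floordiv (s + i) n)
      = List.replicate (n - r).toNat q := by
    rw [map_const_on _ _ q, PySem.List.length_pyRange_one]
    · simp
    · intro x hx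
      rw [PySem.List.mem_pyRange_one] at hx
      rw [PySem.Int.floordiv_eq_iff_of_pos (hb := hpos)]
      constructor
      · omega
      · have : (q + 1) * n = q * n + n := by ring
        omega
  have hhi : (PySem.List.pyRange (n - r) n 1).map (fun i => PySem.Int.floordiv (s + i) n)
      = List.replicate r.toNat (q + 1) := by
    rw [map_const_on _ _ (q + 1), PySem.List.length_pyRange_one]
    · have : (n - (n - r)).toNat = r.toNat := by omega
      rw [this]
    · intro x hx
      rw [PySem.List.mem_pyRange_one] at hx
      rw [PySem.Int.floordiv_eq_iff_of_pos (hb := hpos)]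
      have h1 : (q + 1) * n = q * n + n := by ring
      have h2 : (q + 1 + 1) * n = q * n + n + n := by ring
      constructor
      · omega
      · omega
  rw [hlo, hhi]

-- ===== VERDICT (by name: the statement is the Claim_ definition above) =====
theorem solution_spec : Claim_equal_solution := by
  intro n s _ hn
  unfold Spec_solution solution solution_alt
  by_cases hq : PySem.Int.floordiv s n < 1
  · simp [hq]
  · simp only [hq, if_false]
    set q := PySem.Int.floordiv s n with hqdef
    set r := PySem.Int.mod s n with hrdef
    rcases lt_or_gt_of_ne hn with hneg | hpos
    · -- n < 0 : all ranges are empty, both sides are []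
      have h1 : PySem.List.pyRange 0 n 1 = [] := PySem.List.pyRange_one_eq_nil (by omega)
      have hr := PySem.Int.mod_neg_bounds (a := s) (b := n) hneg
      have h2 : PySem.List.pyRange 0 r 1 = [] := PySem.List.pyRange_one_eq_nil (by omega)
      simp [h1, h2]
    · -- n > 0 : both sides equal the two-segment form
      have hr0 : 0 ≤ r := PySem.Int.mod_nonneg (a := s) hpos
      have hrn : r < n := PySem.Int.mod_lt (a := s) hpos
      have hfill : (PySem.List.pyRange 0 n 1).foldl (fun acc _ => acc ++ [q]) []
          = List.replicate n.toNat q := by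
        rw [foldl_append_replicate]
        simp [PySem.List.length_pyRange_one]
      rw [hfill]
      have hlen : ((List.replicate n.toNat q).length : Int) = n := by simp; omega
      rw [hlen]
      have hrcast : r = ((r.toNat : Nat) : Int) := by omega
      calc (PySem.List.pyRange 0 r 1).foldl
              (fun acc i => pySetItem acc (n - 1 - i) (· + 1)) (List.replicate n.toNat q)
          = (PySem.List.pyRange 0 ((r.toNat : Nat) : Int) 1).foldl
              (fun acc i => pySetItem acc (((n.toNat : Int) - 1) - i) (· + 1))
              (List.replicate n.toNat q) := by
            rw [← hrcast]
            have : ((n.toNat : Nat) : Int) = n := by omega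
            rw [this]
        _ = List.replicate (n.toNat - r.toNat) q ++ List.replicate r.toNat (q + 1) :=
            loop2_eq n.toNat q r.toNat (by omega)
        _ = List.replicate (n - r).toNat q ++ List.replicate r.toNat (q + 1) := by
            have : (n - r).toNat = n.toNat - r.toNat := by omega
            rw [this]
        _ = (PySem.List.pyRange 0 n 1).map (fun i => PySem.Int.floordiv (s + i) n) :=
            (map_formula_eq n s hpos).symm
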